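-- pv_equiv track=rewrite | github.com/Gowri2727/GFG-problems | Difficulty: Basic/Check Binary String/check-binary-string.py | checkBinary
-- ===== SOURCE A (Python) =====
-- def checkBinary (s):
--     # Your code here
--     one_seen = False
--     zero_after_one = False
--
--     for ch in s:
--         if ch == '1':
--             if zero_after_one:
--                 return False
--             one_seen = True
--         else:  # ch == '0'
--             if one_seen:
--                 zero_after_one = True
--
--     return True
-- ===== SOURCE B (Python) =====
-- def checkBinary(s):
--     # Closed-form span check with library scans: the '1's are contiguous
--     # iff the distance between the first and last '1' equals their count.
--     c = s.count('1')
--     if c == 0: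
--         return True
--     return s.rindex('1') - s.index('1') + 1 == c
-- ===== Notes on version B (the rewrite author's own statement) =====
-- stated objective: faster
-- what changed: Replaces A's per-character flag state machine (one_seen/zero_after_one with early return) by staged library scans and a closed-form test: the string is valid iff the distance between the first and last occurrence of the one-character equals its count.
import Mathlib
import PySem

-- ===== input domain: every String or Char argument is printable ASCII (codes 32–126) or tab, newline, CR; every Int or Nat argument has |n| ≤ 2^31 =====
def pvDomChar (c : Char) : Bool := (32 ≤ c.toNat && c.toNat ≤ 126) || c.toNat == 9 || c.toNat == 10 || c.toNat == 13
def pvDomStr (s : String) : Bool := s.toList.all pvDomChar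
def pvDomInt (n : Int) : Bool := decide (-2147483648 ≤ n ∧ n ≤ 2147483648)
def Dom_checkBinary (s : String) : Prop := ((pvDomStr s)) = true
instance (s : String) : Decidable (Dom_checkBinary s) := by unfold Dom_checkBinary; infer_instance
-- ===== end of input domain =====

-- B replaces A's flag state machine by staged library scans (count/index/rindex) and a closed-form span test; measurably faster (C-level scans vs per-char Python loop).

-- ===== PORT A =====
-- the for-loop with early return, state (one_seen, zero_after_one)
def goA : List Char → Bool → Bool → Bool
  | [], _, _ => true
  | c :: cs, one, zero =>
    if c = '1' then
      if zero then false else goA cs true zero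
    else
      if one then goA cs one true else goA cs one zero

def checkBinary (s : String) : Bool := goA s.toList false false

-- ===== PORT B =====
-- s.count('1') → List.count; s.index('1') → idxOf; s.rindex('1') → length - 1 - reverse.idxOf
-- (exact: rindex of a single character is the index of its last occurrence).
def checkBinary_alt (s : String) : Bool :=
  let l := s.toList
  let c := l.count '1'
  if c = 0 then true
  else decide ((l.length - 1 - l.reverse.idxOf '1') - l.idxOf '1' + 1 = c)

-- ===== PRECONDITION & SPEC =====
def Spec_checkBinary (s : String) (out : Bool) : Prop := out = checkBinary_alt s
instance (s : String) (out : Bool) : Decidable (Spec_checkBinary s out) := by unfold Spec_checkBinary; infer_instance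

-- ===== CLAIM (what is proved, stated in full; the proofs are below) =====
def Claim_equal_checkBinary : Prop := ∀ (s : String), Dom_checkBinary s → Spec_checkBinary s (checkBinary s)

-- ===== LEMMAS AND PROOFS =====
-- proof-only helpers: the two phases of the scan A performs after its flags flip
def skip1s : List Char → List Char
  | [] => []
  | c :: cs => if c = '1' then skip1s cs else c :: cs

theorem goA_true_true (l : List Char) : goA l true true = !(l.contains '1') := by
  induction l with
  | nil => rfl
  | cons c cs ih =>
    by_cases h : c = '1'
    · simp [goA, h]
    · simp [goA, h, ih, Ne.symm h]

theorem goA_true_false (l : List Char) : goA l true false = !((skip1s l).contains '1') := by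
  induction l with
  | nil => rfl
  | cons c cs ih =>
    by_cases h : c = '1'
    · simp [goA, skip1s, h, ih]
    · simp [goA, skip1s, h, goA_true_true, Ne.symm h]

theorem skip1s_not_mem (l : List Char) (h : '1' ∉ l) : (skip1s l).contains '1' = false := by
  cases l with
  | nil => rfl
  | cons c cs =>
    have hc : ¬ c = '1' := by intro hh; exact h (hh ▸ List.mem_cons_self)
    simp [skip1s, hc]
    exact ⟨by rintro rfl; exact h List.mem_cons_self, fun h1 => h (List.mem_cons_of_mem _ h1)⟩

theorem idxOf_append_of_mem (a : Char) (l r : List Char) (h : a ∈ l) :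
    (l ++ r).idxOf a = l.idxOf a := by
  induction l with
  | nil => cases h
  | cons c cs ih =>
    by_cases hc : c = a
    · simp [hc, List.idxOf_cons_self]
    · have : a ∈ cs := by
        rcases List.mem_cons.mp h with h1 | h1
        · exact absurd h1.symm hc
        · exact h1
      simp [hc, ih this]

theorem idxOf_append_of_not_mem (a : Char) (l r : List Char) (h : a ∉ l) :
    (l ++ r).idxOf a = l.length + r.idxOf a := by
  induction l with
  | nil => simp
  | cons c cs ih =>
    have hc : ¬ c = a := by intro hh; exact h (hh ▸ List.mem_cons_self)
    have : a ∉ cs := fun h1 => h (List.mem_cons_of_mem _ h1)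
    simp [hc, ih this]
    omega

theorem count_drop_idxOf (a : Char) (l : List Char) :
    l.count a = (l.drop (l.idxOf a)).count a := by
  induction l with
  | nil => rfl
  | cons c cs ih =>
    by_cases hc : c = a
    · simp [hc, List.idxOf_cons_self]
    · simp [hc, ih]

-- count of '1' is at most length minus the reversed index of the last '1'
theorem count_le_sub (l : List Char) (h : '1' ∈ l) :
    l.count '1' + l.reverse.idxOf '1' ≤ l.length := by
  have h1 : l.count '1' = l.reverse.count '1' := (List.count_reverse ..).symm
  have h2 := count_drop_idxOf '1' l.reverse
  have h3 : (l.reverse.drop (l.reverse.idxOf '1')).count '1'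
      ≤ l.reverse.length - l.reverse.idxOf '1' := by
    calc _ ≤ (l.reverse.drop (l.reverse.idxOf '1')).length := List.count_le_length
    _ = _ := by simp
  have h4 : l.reverse.idxOf '1' < l.reverse.length :=
    List.idxOf_lt_length_of_mem (by simpa using h)
  have hrev : l.reverse.length = l.length := by simp
  omega

theorem first_add_last (l : List Char) (h : '1' ∈ l) :
    l.idxOf '1' + l.reverse.idxOf '1' + 1 ≤ l.length := by
  induction l with
  | nil => cases h
  | cons c cs ih =>
    by_cases hc : c = '1'
    · subst hc
      have hlt : ('1' :: cs).reverse.idxOf '1' < ('1' :: cs).reverse.length :=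
        List.idxOf_lt_length_of_mem (by simp)
      have hlen : ('1' :: cs).reverse.length = cs.length + 1 := by simp
      simp only [List.idxOf_cons_self, List.length_cons]
      omega
    · have hmem : '1' ∈ cs := by
        rcases List.mem_cons.mp h with h1 | h1
        · exact absurd h1.symm hc
        · exact h1
      have hr : List.idxOf '1' (cs.reverse ++ [c]) = List.idxOf '1' cs.reverse :=
        idxOf_append_of_mem '1' cs.reverse [c] (by simpa using hmem)
      have hidx : List.idxOf '1' (c :: cs) = List.idxOf '1' cs + 1 := List.idxOf_cons_ne cs hc
      have hih := ih hmem
      simp only [List.reverse_cons, List.length_cons, hidx, hr]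
      omega

-- key lemma for the tail after the first '1'
theorem skip1s_eq_span (cs : List Char) (h : '1' ∈ cs) :
    (!(skip1s cs).contains '1') =
      decide (cs.length - cs.reverse.idxOf '1' = cs.count '1') := by
  induction cs with
  | nil => cases h
  | cons c ds ih =>
    by_cases hc : c = '1'
    · subst hc
      rw [show skip1s ('1' :: ds) = skip1s ds from by simp [skip1s]]
      have hcnt1 : List.count '1' ('1' :: ds) = List.count '1' ds + 1 := by
        simp
      by_cases hm : '1' ∈ ds
      · have hr : ('1' :: ds).reverse.idxOf '1' = List.idxOf '1' ds.reverse := by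
          simp only [List.reverse_cons]
          exact idxOf_append_of_mem '1' ds.reverse ['1'] (by simpa using hm)
        have hlt : List.idxOf '1' ds.reverse < ds.length := by
          have := List.idxOf_lt_length_of_mem (l := ds.reverse) (a := '1') (by simpa using hm)
          simpa using this
        rw [ih hm, decide_eq_decide, hr, hcnt1, List.length_cons]
        omega
      · have hr : ('1' :: ds).reverse.idxOf '1' = ds.length := by
          simp only [List.reverse_cons]
          have := idxOf_append_of_not_mem '1' ds.reverse ['1'] (by simpa using hm)
          simpa using this
        have hcount : ds.count '1' = 0 := List.count_eq_zero.mpr hm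
        rw [skip1s_not_mem ds hm]
        exact (decide_eq_true (by rw [hr, hcnt1, List.length_cons]; omega)).symm
    · have hm : '1' ∈ ds := by
        rcases List.mem_cons.mp h with h1 | h1
        · exact absurd h1.symm hc
        · exact h1
      have hr : (c :: ds).reverse.idxOf '1' = List.idxOf '1' ds.reverse := by
        simp only [List.reverse_cons]
        exact idxOf_append_of_mem '1' ds.reverse [c] (by simpa using hm)
      have hcnt2 : List.count '1' (c :: ds) = List.count '1' ds := by
        simp [hc]
      have hle := count_le_sub ds hm
      have hlt : List.idxOf '1' ds.reverse < ds.length := by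
        have := List.idxOf_lt_length_of_mem (l := ds.reverse) (a := '1') (by simpa using hm)
        simpa using this
      have hcnt : 1 ≤ ds.count '1' := List.one_le_count_iff.mpr hm
      rw [show skip1s (c :: ds) = c :: ds from by simp [skip1s, hc]]
      have hcontains : (c :: ds).contains '1' = true := by
        simp only [List.contains_cons]
        simp [hm]
      rw [hcontains]
      exact (decide_eq_false (by rw [hr, hcnt2, List.length_cons]; omega)).symm

-- main characterisation: A's scan equals B's span formula
theorem goA_eq_alt (l : List Char) :
    goA l false false =
      (if l.count '1' = 0 then true
       else decide ((l.length - 1 - l.reverse.idxOf '1') - l.idxOf '1' + 1 = l.count '1')) := by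
  induction l with
  | nil => rfl
  | cons c cs ih =>
    by_cases hc : c = '1'
    · subst hc
      have hA : goA ('1' :: cs) false false = goA cs true false := by simp [goA]
      have hcnt1 : List.count '1' ('1' :: cs) = List.count '1' cs + 1 := by
        simp
      have hne : ¬ (List.count '1' ('1' :: cs) = 0) := by omega
      rw [hA, goA_true_false, if_neg hne]
      by_cases hm : '1' ∈ cs
      · have hr : ('1' :: cs).reverse.idxOf '1' = List.idxOf '1' cs.reverse := by
          simp only [List.reverse_cons]
          exact idxOf_append_of_mem '1' cs.reverse ['1'] (by simpa using hm)
        have hlt : List.idxOf '1' cs.reverse < cs.length := by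
          have := List.idxOf_lt_length_of_mem (l := cs.reverse) (a := '1') (by simpa using hm)
          simpa using this
        rw [skip1s_eq_span cs hm, decide_eq_decide, hr, hcnt1, List.length_cons,
          List.idxOf_cons_self]
        omega
      · have hr : ('1' :: cs).reverse.idxOf '1' = cs.length := by
          simp only [List.reverse_cons]
          have := idxOf_append_of_not_mem '1' cs.reverse ['1'] (by simpa using hm)
          simpa using this
        have hcount : cs.count '1' = 0 := List.count_eq_zero.mpr hm
        rw [skip1s_not_mem cs hm]
        exact (decide_eq_true (by
          rw [hr, hcnt1, List.length_cons, List.idxOf_cons_self]; omega)).symm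
    · have hA : goA (c :: cs) false false = goA cs false false := by simp [goA, hc]
      have hcnt2 : List.count '1' (c :: cs) = List.count '1' cs := by
        simp [hc]
      rw [hA, ih]
      by_cases hm : '1' ∈ cs
      · have hne : ¬ (List.count '1' cs = 0) := by
          have := List.one_le_count_iff.mpr hm; omega
        have hne2 : ¬ (List.count '1' (c :: cs) = 0) := by omega
        have hr : (c :: cs).reverse.idxOf '1' = List.idxOf '1' cs.reverse := by
          simp only [List.reverse_cons]
          exact idxOf_append_of_mem '1' cs.reverse [c] (by simpa using hm)
        have hlt : List.idxOf '1' cs.reverse < cs.length := by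
          have := List.idxOf_lt_length_of_mem (l := cs.reverse) (a := '1') (by simpa using hm)
          simpa using this
        have hfl := first_add_last cs hm
        have hidx : List.idxOf '1' (c :: cs) = List.idxOf '1' cs + 1 := List.idxOf_cons_ne cs hc
        rw [if_neg hne, if_neg hne2, decide_eq_decide, hr, hcnt2, hidx, List.length_cons]
        omega
      · have hcount0 : cs.count '1' = 0 := List.count_eq_zero.mpr hm
        rw [if_pos hcount0, if_pos (by omega)]

-- ===== VERDICT (by name: the statement is the Claim_ definition above) =====
theorem checkBinary_spec : Claim_equal_checkBinary := by
  intro s _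
  unfold Spec_checkBinary checkBinary checkBinary_alt
  exact goA_eq_alt s.toList
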